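-- pv_equiv track=rewrite | github.com/dave-mp/adventofcode-2024 | 9/2/main.py | find_file_block
-- ===== SOURCE A (Python) =====
-- def find_file_block(block_chain, id):
--     index = block_chain.index(id)
--     count = 0
--     for x in block_chain[index:]:
--         if x == id:
--             count += 1
--         else:
--             break
--
--     return (index, count)
-- ===== SOURCE B (Python) =====
-- def _run(v, xs):
--     # number of leading elements of xs equal to v
--     c = 0
--     for x in xs:
--         if x == v:
--             c += 1
--         else:
--             break
--     return c
--
--
-- def _rle(xs):
--     # run-length encoding: list of (value, run_length) for consecutive runs
--     if not xs:
--         return []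
--     k = _run(xs[0], xs[1:])
--     return [(xs[0], 1 + k)] + _rle(xs[1 + k:])
--
--
-- def find_file_block(block_chain, id):
--     offset = 0
--     for value, length in _rle(block_chain):
--         if value == id:
--             return (offset, length)
--         offset += length
--     raise ValueError(f"{id} is not in list")
-- ===== Notes on version B (the rewrite author's own statement) =====
-- stated objective: alternative
-- what changed: B first run-length-encodes the whole list into (value, run_length) pairs and then scans the runs with a running offset, returning at the first run whose value equals id, instead of A's list.index search followed by slicing and counting at that position.
import Mathlib
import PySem

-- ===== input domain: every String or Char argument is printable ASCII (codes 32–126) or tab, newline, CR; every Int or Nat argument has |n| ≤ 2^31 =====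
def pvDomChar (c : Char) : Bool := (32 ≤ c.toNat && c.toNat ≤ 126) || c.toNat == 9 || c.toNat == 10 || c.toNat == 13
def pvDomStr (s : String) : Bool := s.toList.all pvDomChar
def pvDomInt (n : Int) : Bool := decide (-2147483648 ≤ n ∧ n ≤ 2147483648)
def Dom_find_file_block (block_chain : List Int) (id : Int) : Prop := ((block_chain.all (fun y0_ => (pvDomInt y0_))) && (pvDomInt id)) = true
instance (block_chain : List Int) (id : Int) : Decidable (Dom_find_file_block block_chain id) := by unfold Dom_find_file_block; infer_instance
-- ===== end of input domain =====

-- B run-length-encodes the list and then scans the runs with a running offset; alternative decomposition via an intermediate RLE, same cost.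
-- Both programs raise ValueError when id is absent, so Pre_ requires membership.

-- ===== PORT A =====
-- A's 'for x in block_chain[index:]: count += 1 / break' loop, with the running count as accumulator
def pvLoopA (id : Int) (count : Int) : List Int → Int
  | [] => count
  | x :: xs => if x == id then pvLoopA id (count + 1) xs else count

def find_file_block (block_chain : List Int) (id : Int) : Int × Int :=
  match PySem.List.index? block_chain id with
  | none => (0, 0)  -- Python raises ValueError here; excluded by Pre_
  | some index => ((index : Int), pvLoopA id 0 (PySem.List.slice block_chain (some (index : Int)) none))

-- ===== PORT B =====
-- B's _run: number of leading elements equal to v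
def pvRun (v : Int) : List Int → Nat
  | [] => 0
  | x :: xs => if x == v then 1 + pvRun v xs else 0

-- B's _rle: run-length encoding into (value, run_length) pairs
def pvRle : List Int → List (Int × Int)
  | [] => []
  | x :: xs =>
    (x, (1 : Int) + (pvRun x xs : Int)) :: pvRle (xs.drop (pvRun x xs))
termination_by l => l.length
decreasing_by
  simp only [List.length_cons, List.length_drop]
  omega

-- B's scan over the runs with the running offset
def pvSearch (id : Int) : List (Int × Int) → Int → Int × Int
  | [], _ => (0, 0)  -- Python raises ValueError here; excluded by Pre_
  | (v, len) :: rest, off => if v == id then (off, len) else pvSearch id rest (off + len)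

def find_file_block_alt (block_chain : List Int) (id : Int) : Int × Int :=
  pvSearch id (pvRle block_chain) 0

-- ===== PRECONDITION & SPEC =====
-- Pre_ excludes exactly the inputs where A's .index (and B's run scan) raises ValueError: id not in the list.
def Pre_find_file_block (block_chain : List Int) (id : Int) : Prop := id ∈ block_chain
instance (block_chain : List Int) (id : Int) : Decidable (Pre_find_file_block block_chain id) := by unfold Pre_find_file_block; infer_instance
def pvWitness_find_file_block : List Int × Int := ([3, 5, 5, 2], 5)

def Spec_find_file_block (block_chain : List Int) (id : Int) (out : Int × Int) : Prop := out = find_file_block_alt block_chain id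
instance (block_chain : List Int) (id : Int) (out : Int × Int) : Decidable (Spec_find_file_block block_chain id out) := by unfold Spec_find_file_block; infer_instance

-- ===== CLAIM (what is proved, stated in full; the proofs are below) =====
def Claim_equal_find_file_block : Prop := ∀ (block_chain : List Int) (id : Int), Dom_find_file_block block_chain id → Pre_find_file_block block_chain id → Spec_find_file_block block_chain id (find_file_block block_chain id)

-- ===== LEMMAS AND PROOFS =====

theorem pvLoopA_eq_add_run (id : Int) (l : List Int) : ∀ c, pvLoopA id c l = c + (pvRun id l : Int) := by
  induction l with
  | nil => intro c; simp [pvLoopA, pvRun]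
  | cons x xs ih =>
    intro c
    by_cases h : x = id
    · simp [pvLoopA, pvRun, h, ih]; ring
    · simp [pvLoopA, pvRun, h]

theorem drop_pvRun_cons (v : Int) (ys : List Int) :
    List.drop (pvRun v (v :: ys)) (v :: ys) = List.drop (pvRun v ys) ys := by
  simp only [pvRun, beq_self_eq_true, if_true, Nat.add_comm, List.drop_succ_cons]

-- skipping a prefix of k copies of v ≠ id shifts index? by k
theorem index?_drop_run (id v : Int) (hv : v ≠ id) :
    ∀ (l : List Int) (j : Nat), PySem.List.index? l id = some j →
      ∃ m, j = pvRun v l + m ∧ PySem.List.index? (l.drop (pvRun v l)) id = some m := by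
  intro l
  induction l with
  | nil => intro j h; rw [PySem.List.index?_eq_idxOf?] at h; simp [List.idxOf?] at h
  | cons y ys ih =>
    intro j h
    by_cases hy : y = v
    · subst hy
      rw [PySem.List.index?_cons_of_ne ys hv] at h
      cases hys : PySem.List.index? ys id with
      | none => rw [hys] at h; simp at h
      | some j' =>
        rw [hys] at h; simp at h
        obtain ⟨m, hm, hdrop⟩ := ih j' hys
        refine ⟨m, ?_, ?_⟩
        · simp [pvRun]; omega
        · rw [drop_pvRun_cons]; exact hdrop
    · refine ⟨j, by simp [pvRun, hy], ?_⟩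
      simpa [pvRun, hy] using h

theorem pvSearch_rle (id : Int) :
    ∀ (n : Nat) (l : List Int), l.length ≤ n →
      ∀ (j : Nat), PySem.List.index? l id = some j →
        ∀ (off : Int), pvSearch id (pvRle l) off = ((j : Int) + off, pvLoopA id 0 (l.drop j)) := by
  intro n
  induction n with
  | zero =>
    intro l hl j h
    have : l = [] := List.length_eq_zero_iff.mp (Nat.le_zero.mp hl)
    subst this
    rw [PySem.List.index?_eq_idxOf?] at h; simp [List.idxOf?] at h
  | succ n ih =>
    intro l hl j h off
    cases l with
    | nil => rw [PySem.List.index?_eq_idxOf?] at h; simp [List.idxOf?] at h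
    | cons x xs =>
      by_cases hx : x = id
      · subst hx
        rw [PySem.List.index?_cons_self] at h
        cases h
        simp [pvRle, pvSearch, pvLoopA_eq_add_run, pvRun]
      · rw [PySem.List.index?_cons_of_ne xs hx] at h
        cases hxs : PySem.List.index? xs id with
        | none => rw [hxs] at h; simp at h
        | some j' =>
          rw [hxs] at h; simp at h
          subst h
          obtain ⟨m, hm, hdrop⟩ := index?_drop_run id x hx xs j' hxs
          have hlen : (xs.drop (pvRun x xs)).length ≤ n := by
            simp only [List.length_cons] at hl
            simp only [List.length_drop]
            omega
          have hrec := ih (xs.drop (pvRun x xs)) hlen m hdrop (off + ((1 : Int) + (pvRun x xs : Int)))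
          have hxne : (x == id) = false := by simp [hx]
          simp only [pvRle, pvSearch, hxne, Bool.false_eq_true, if_false, hrec]
          rw [Prod.mk.injEq]
          refine ⟨by push_cast [hm]; ring, ?_⟩
          rw [List.drop_drop, List.drop_succ_cons]
          have hjm : pvRun x xs + m = j' := by omega
          rw [hjm]

-- ===== VERDICT (by name: the statement is the Claim_ definition above) =====
theorem find_file_block_spec : Claim_equal_find_file_block := by
  intro bc id _ hpre
  unfold Spec_find_file_block find_file_block find_file_block_alt
  cases h : PySem.List.index? bc id with
  | none => exact absurd hpre ((PySem.List.index?_eq_none_iff bc id).mp h)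
  | some idx =>
    rw [pvSearch_rle id bc.length bc le_rfl idx h 0]
    simp [PySem.List.slice_from_natCast]
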